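-- pv_equiv track=rewrite | github.com/nwng/Bioinformatics-Coursera | Unit1.py | Count
-- ===== SOURCE A (Python) =====
-- def Count(Motifs):
--     count = {} # initializing the count dictionary
--     k = len(Motifs[0])
--     for symbol in "ACGT":
--         count[symbol] = []
--         for j in range(k):
--              count[symbol].append(0)
--     t = len(Motifs)
--     for i in range(t):
--         for j in range(k):
--             symbol = Motifs[i][j].upper()
--             count[symbol][j] += 1
--     return count
-- ===== SOURCE B (Python) =====
-- def Count(Motifs):
--     k = len(Motifs[0])
--     result = {s: [0] * k for s in "ACGT"}
--     for j in range(k):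
--         col = sorted(row[j].upper() for row in Motifs)
--         i = 0
--         while i < len(col):
--             r = i
--             while r < len(col) and col[r] == col[i]:
--                 r += 1
--             result[col[i]][j] = r - i
--             i = r
--     return result
-- ===== Notes on version B (the rewrite author's own statement) =====
-- stated objective: alternative
-- what changed: A preallocates four zero rows in a dict and increments one cell per character with nested index loops; B sorts each column and writes each symbol's count once per column as the length of its run in the sorted column.
import Mathlib
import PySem

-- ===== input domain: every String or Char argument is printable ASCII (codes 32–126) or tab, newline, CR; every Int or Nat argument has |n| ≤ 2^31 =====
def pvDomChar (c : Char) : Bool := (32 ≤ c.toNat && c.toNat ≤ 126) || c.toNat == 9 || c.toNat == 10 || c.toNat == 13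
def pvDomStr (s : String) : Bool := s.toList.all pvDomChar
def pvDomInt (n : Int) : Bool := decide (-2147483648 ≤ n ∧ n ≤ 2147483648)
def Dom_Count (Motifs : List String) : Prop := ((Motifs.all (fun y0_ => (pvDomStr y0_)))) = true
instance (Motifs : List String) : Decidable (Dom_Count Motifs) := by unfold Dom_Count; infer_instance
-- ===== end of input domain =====

-- B replaces A's per-cell counter increments with a sort-and-scan per column: each column
-- is sorted and each symbol's count is written once as the length of its run in the sorted
-- column. Equivalence of the return values is proved on Pre_Count, where A returns.
-- Python's 1-char dict keys are modelled as Char and rendered as 1-char Strings at the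
-- end of both ports alike, per the PySem convention.

-- ===== PORT A =====
def Count (Motifs : List String) : List (String × List Int) :=
  let k := (Motifs.headD "").toList.length          -- k = len(Motifs[0]); Pre_ excludes Motifs = []
  -- count = {}; for symbol in "ACGT": count[symbol] = []; for j in range(k): count[symbol].append(0)
  let count : PySem.Dict Char (List Int) :=
    "ACGT".toList.foldl (fun d symbol =>
        (List.range k).foldl (fun d _ => d.modify symbol [] (fun l => l ++ [(0 : Int)]))
          (d.insert symbol [])) PySem.Dict.empty
  let t := Motifs.length
  -- for i in range(t): for j in range(k): symbol = Motifs[i][j].upper(); count[symbol][j] += 1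
  let count :=
    (List.range t).foldl (fun d i =>
      (List.range k).foldl (fun d j =>
        let symbol := PySem.Chars.upperChar (((Motifs.getD i "").toList).getD j ' ')
        d.modify symbol [] (fun l => l.set j (l.getD j 0 + 1))) d) count
  count.items.map (fun p => (String.ofList [p.1], p.2))

-- ===== PORT B =====
-- r = i; while r < len(col) and col[r] == col[i]: r += 1    (run end of the run starting at i)
def pvRunEnd (col : List Char) (c : Char) (r : Nat) : Nat :=
  if h : r < col.length ∧ col.getD r ' ' = c then pvRunEnd col c (r + 1) else r
termination_by col.length - r
decreasing_by have := h.1; omega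

-- the port's outer while loop needs this to terminate: the run end is past its start
theorem pvRunEnd_ge (col : List Char) (c : Char) (r : Nat) : r ≤ pvRunEnd col c r := by
  rw [pvRunEnd]
  split_ifs with h
  · exact Nat.le_trans (Nat.le_succ r) (pvRunEnd_ge col c (r + 1))
  · exact Nat.le_refl r
termination_by col.length - r
decreasing_by have := h.1; omega

-- i = 0; while i < len(col): … result[col[i]][j] = r - i; i = r
def pvColLoop (col : List Char) (j : Nat) (d : PySem.Dict Char (List Int)) (i : Nat) :
    PySem.Dict Char (List Int) :=
  if _hlt : i < col.length then
    pvColLoop col j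
      (d.modify (col.getD i ' ') []
        (fun l => l.set j ((pvRunEnd col (col.getD i ' ') i - i : Nat) : Int)))
      (pvRunEnd col (col.getD i ' ') i)
  else d
termination_by col.length - i
decreasing_by
  have h1 : pvRunEnd col (col.getD i ' ') i = pvRunEnd col (col.getD i ' ') (i + 1) := by
    rw [pvRunEnd]; exact dif_pos ⟨_hlt, rfl⟩
  have h2 := pvRunEnd_ge col (col.getD i ' ') (i + 1)
  omega

def Count_alt (Motifs : List String) : List (String × List Int) :=
  let k := (Motifs.headD "").toList.length          -- k = len(Motifs[0]); Pre_ excludes Motifs = []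
  -- result = {s: [0] * k for s in "ACGT"}
  let result : PySem.Dict Char (List Int) :=
    "ACGT".toList.foldl (fun d s => d.insert s (List.replicate k (0 : Int))) PySem.Dict.empty
  -- for j in range(k): col = sorted(row[j].upper() for row in Motifs); run-length scan
  let result :=
    (List.range k).foldl (fun d j =>
      pvColLoop
        (PySem.List.sorted (Motifs.map (fun row => PySem.Chars.upperChar (row.toList.getD j ' ')))
          (fun c => c) false) j d 0) result
  result.items.map (fun p => (String.ofList [p.1], p.2))

-- ===== PRECONDITION & SPEC =====
-- Pre_Count is exactly where the Python A returns: Motifs nonempty (else IndexError on Motifs[0]),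
-- every row at least k = len(Motifs[0]) long (else IndexError), and the first k characters of every
-- row uppercase to one of A,C,G,T (else KeyError).
def Pre_Count (Motifs : List String) : Prop :=
  Motifs ≠ [] ∧ ∀ row ∈ Motifs,
    (Motifs.headD "").toList.length ≤ row.toList.length ∧
    ((row.toList.take ((Motifs.headD "").toList.length)).all
      (fun c => decide (PySem.Chars.upperChar c ∈ (['A', 'C', 'G', 'T'] : List Char)))) = true
instance (Motifs : List String) : Decidable (Pre_Count Motifs) := by unfold Pre_Count; infer_instance

def pvWitness_Count : List String := ["AC", "gt"]

def Spec_Count (Motifs : List String) (out : List (String × List Int)) : Prop := out = Count_alt Motifs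
instance (Motifs : List String) (out : List (String × List Int)) : Decidable (Spec_Count Motifs out) := by unfold Spec_Count; infer_instance

-- ===== CLAIM (what is proved, stated in full; the proofs are below) =====
def Claim_equal_Count : Prop := ∀ (Motifs : List String), Dom_Count Motifs → Pre_Count Motifs → Spec_Count Motifs (Count Motifs)

-- ===== LEMMAS AND PROOFS =====

-- the symbol read by A at row `row`, column `j`
abbrev pvSym (row : String) (j : Nat) : Char := PySem.Chars.upperChar (row.toList.getD j ' ')

def pvACGT : List Char := ['A', 'C', 'G', 'T']

theorem pv_ACGT_toList : "ACGT".toList = pvACGT := rfl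

-- setting index j of a tabulated list retabulates it
theorem pv_map_range_set (k j : Nat) (_hj : j < k) (g : Nat → Int) (v : Int) :
    ((List.range k).map g).set j v = (List.range k).map (fun i => if i = j then v else g i) := by
  apply List.ext_getElem
  · simp
  · intro i h1 h2
    simp only [List.getElem_set, List.getElem_map, List.getElem_range] at *
    by_cases h : j = i <;> simp [h, eq_comm]

-- a fold of n zero-appends at key s, seen through getD
theorem pv_getD_zero_fold (s s' : Char) (n : Nat) (d : PySem.Dict Char (List Int)) :
    ((List.range n).foldl (fun d _ => d.modify s [] (fun l => l ++ [(0 : Int)])) d).getD s' []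
    = if s' = s then d.getD s' [] ++ (List.range n).map (fun _ => (0 : Int)) else d.getD s' [] := by
  induction n with
  | zero => simp
  | succ n ih =>
    rw [List.range_succ, List.foldl_append, List.foldl_cons, List.foldl_nil,
      PySem.Dict.getD_modify]
    by_cases h : s' = s
    · subst h; simp [ih]
    · simp [h, ih]

-- a modify-fold whose keys are already present keeps the key list
theorem pv_keys_fold_modify {a v : Type} (L : List a) (key : a → Char) (d0 : v) (F : a → v → v) :
    ∀ d : PySem.Dict Char v, (∀ x ∈ L, key x ∈ d.keys) →
      (L.foldl (fun d x => d.modify (key x) d0 (F x)) d).keys = d.keys := by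
  induction L with
  | nil => intro d _; rfl
  | cons x L ih =>
    intro d h
    have hc : d.contains (key x) = true := by
      rw [PySem.Dict.contains_eq_decide_mem_keys]
      exact decide_eq_true (h x (List.mem_cons_self ..))
    have hk : (d.modify (key x) d0 (F x)).keys = d.keys := by
      rw [PySem.Dict.keys_modify, PySem.Dict.keys_insert_of_contains _ _ hc]
    rw [List.foldl_cons, ih _ (by intro y hy; rw [hk]; exact h y (List.mem_cons_of_mem _ hy)), hk]

-- ===== A side: initialisation =====

theorem pv_keys_step (symbol : Char) (k : Nat) (d : PySem.Dict Char (List Int))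
    (h : d.contains symbol = false) :
    ((List.range k).foldl (fun d _ => d.modify symbol [] (fun l => l ++ [(0 : Int)]))
      (d.insert symbol [])).keys = d.keys ++ [symbol] := by
  rw [pv_keys_fold_modify (List.range k) (fun _ => symbol) [] (fun _ l => l ++ [(0 : Int)])
      _ (by intro x _; exact (PySem.Dict.mem_keys_insert _ _ _ _).mpr (Or.inl rfl))]
  exact PySem.Dict.keys_insert_of_not_contains _ _ h

theorem pv_A_init_keys_aux (k : Nat) : ∀ (syms : List Char) (d : PySem.Dict Char (List Int)),
    syms.Nodup → (∀ c ∈ syms, c ∉ d.keys) →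
    (syms.foldl (fun d symbol =>
        (List.range k).foldl (fun d _ => d.modify symbol [] (fun l => l ++ [(0 : Int)]))
          (d.insert symbol [])) d).keys = d.keys ++ syms := by
  intro syms
  induction syms with
  | nil => intro d _ _; simp
  | cons c syms ih =>
    intro d hnd hfresh
    rw [List.foldl_cons]
    have hc : d.contains c = false := by
      rw [PySem.Dict.contains_eq_decide_mem_keys]
      exact decide_eq_false (hfresh c (List.mem_cons_self ..))
    have hkeys := pv_keys_step c k d hc
    rw [ih _ (hnd.of_cons) ?fresh, hkeys, List.append_assoc, List.singleton_append]
    case fresh =>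
      intro c' hc'
      rw [hkeys, List.mem_append, List.mem_singleton]
      rintro (h1 | h1)
      · exact hfresh c' (List.mem_cons_of_mem _ hc') h1
      · exact (List.nodup_cons.mp hnd).1 (h1 ▸ hc')

theorem pv_A_init_getD (k : Nat) (s : Char) (hs : s ∈ pvACGT) :
    ((pvACGT.foldl (fun d symbol =>
        (List.range k).foldl (fun d _ => d.modify symbol [] (fun l => l ++ [(0 : Int)]))
          (d.insert symbol [])) PySem.Dict.empty)).getD s []
    = (List.range k).map (fun _ => (0 : Int)) := by
  simp only [pvACGT, List.mem_cons, List.not_mem_nil, or_false] at hs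
  obtain rfl | rfl | rfl | rfl := hs <;>
    simp [pvACGT, pv_getD_zero_fold, PySem.Dict.getD_insert]

theorem pv_A_init_keys (k : Nat) :
    ((pvACGT.foldl (fun d symbol =>
        (List.range k).foldl (fun d _ => d.modify symbol [] (fun l => l ++ [(0 : Int)]))
          (d.insert symbol [])) PySem.Dict.empty)).keys = pvACGT := by
  have h := pv_A_init_keys_aux k pvACGT PySem.Dict.empty (by decide)
    (by simp [PySem.Dict.keys_empty])
  simpa using h

-- ===== A side: the double counting loop, seen through getD =====

theorem pv_A_row_aux (k : Nat) (row : String) (hsym : ∀ j < k, pvSym row j ∈ pvACGT)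
    (f : Char → Nat → Int) :
    ∀ m, m ≤ k → ∀ d : PySem.Dict Char (List Int),
      (∀ s ∈ pvACGT, d.getD s [] = (List.range k).map (f s)) →
      ∀ s ∈ pvACGT,
      ((List.range m).foldl (fun d j =>
          d.modify (pvSym row j) [] (fun l => l.set j (l.getD j 0 + 1))) d).getD s []
      = (List.range k).map (fun j => if j < m ∧ pvSym row j = s then f s j + 1 else f s j) := by
  intro m
  induction m with
  | zero =>
    intro _ d hd s hs
    simp only [List.range_zero, List.foldl_nil]
    rw [hd s hs]
    exact List.map_congr_left (by intro j _; simp)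
  | succ m ih =>
    intro hm d hd s hs
    have hmk : m < k := hm
    rw [List.range_succ, List.foldl_append, List.foldl_cons, List.foldl_nil,
      PySem.Dict.getD_modify]
    have ihm := ih (le_of_lt hmk) d hd
    by_cases hcase : s = pvSym row m
    · rw [if_pos hcase, ihm (pvSym row m) (hsym m hmk),
        PySem.List.getD_map_range _ _ _ _ hmk, pv_map_range_set k m hmk, hcase]
      apply List.map_congr_left
      intro j hj
      by_cases hjm : j = m
      · subst hjm
        simp
      · rw [if_neg hjm]
        have hiff : (j < m + 1 ∧ pvSym row j = pvSym row m)
            ↔ (j < m ∧ pvSym row j = pvSym row m) := by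
          constructor
          · rintro ⟨h1, h2⟩; exact ⟨by omega, h2⟩
          · rintro ⟨h1, h2⟩; exact ⟨by omega, h2⟩
        rw [if_congr hiff.symm rfl rfl]
    · rw [if_neg hcase, ihm s hs]
      apply List.map_congr_left
      intro j hj
      by_cases hjm : j = m
      · subst hjm
        have h1 : ¬ (j < j ∧ pvSym row j = s) := by rintro ⟨h, _⟩; omega
        have h2 : ¬ (j < j + 1 ∧ pvSym row j = s) := by
          rintro ⟨_, h⟩; exact hcase h.symm
        rw [if_neg h1, if_neg h2]
      · have hiff : (j < m + 1 ∧ pvSym row j = s) ↔ (j < m ∧ pvSym row j = s) := by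
          constructor
          · rintro ⟨h1, h2⟩; exact ⟨by omega, h2⟩
          · rintro ⟨h1, h2⟩; exact ⟨by omega, h2⟩
        rw [if_congr hiff.symm rfl rfl]

theorem pv_A_rows (k : Nat) :
    ∀ (rows : List String), (∀ row ∈ rows, ∀ j < k, pvSym row j ∈ pvACGT) →
    ∀ (d : PySem.Dict Char (List Int)) (f : Char → Nat → Int),
      (∀ s ∈ pvACGT, d.getD s [] = (List.range k).map (f s)) →
      ∀ s ∈ pvACGT,
      (rows.foldl (fun d row => (List.range k).foldl (fun d j =>
          d.modify (pvSym row j) [] (fun l => l.set j (l.getD j 0 + 1))) d) d).getD s []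
      = (List.range k).map (fun j => f s j + (rows.countP (fun r => decide (pvSym r j = s)) : Int)) := by
  intro rows
  induction rows with
  | nil =>
    intro _ d f hd s hs
    simp only [List.foldl_nil, List.countP_nil]
    rw [hd s hs]
    exact List.map_congr_left (by intro j _; simp)
  | cons r rows ih =>
    intro hsym d f hd s hs
    rw [List.foldl_cons]
    have hrow := pv_A_row_aux k r (hsym r (List.mem_cons_self ..)) f k le_rfl d hd
    have ihr := ih (fun row hrr => hsym row (List.mem_cons_of_mem _ hrr))
      _ (fun s j => if j < k ∧ pvSym r j = s then f s j + 1 else f s j) hrow s hs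
    rw [ihr]
    apply List.map_congr_left
    intro j hj
    have hjk : j < k := List.mem_range.mp hj
    rw [List.countP_cons]
    by_cases hc : pvSym r j = s <;> simp [hc, hjk] <;> ring

theorem pv_A_rows_keys (k : Nat) :
    ∀ (rows : List String), (∀ row ∈ rows, ∀ j < k, pvSym row j ∈ pvACGT) →
    ∀ (d : PySem.Dict Char (List Int)), d.keys = pvACGT →
      (rows.foldl (fun d row => (List.range k).foldl (fun d j =>
          d.modify (pvSym row j) [] (fun l => l.set j (l.getD j 0 + 1))) d) d).keys = pvACGT := by
  intro rows
  induction rows with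
  | nil => intro _ d hd; simpa using hd
  | cons r rows ih =>
    intro hsym d hd
    rw [List.foldl_cons]
    refine ih (fun row hrr => hsym row (List.mem_cons_of_mem _ hrr)) _ ?_
    rw [pv_keys_fold_modify (List.range k) (fun j => pvSym r j) []
        (fun j l => l.set j (l.getD j 0 + 1)) d ?_]
    · exact hd
    · intro j hj
      rw [hd]
      exact hsym r (List.mem_cons_self ..) j (List.mem_range.mp hj)

-- index-driven row loop over range(len(xs)) is the structural fold
theorem pv_foldl_range_getD {a b : Type} (xs : List a) (dflt : a) (g : b → a → b) (init : b) :
    (List.range xs.length).foldl (fun acc i => g acc (xs.getD i dflt)) init = xs.foldl g init := by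
  have hxs : (List.range xs.length).map (fun i => xs.getD i dflt) = xs := by
    apply List.ext_getElem
    · simp
    · intro i h1 h2; simp [h2]
  conv_rhs => rw [← hxs]
  rw [List.foldl_map]

theorem pv_A_index_loop (Motifs : List String) (k : Nat) (d : PySem.Dict Char (List Int)) :
    (List.range Motifs.length).foldl (fun d i => (List.range k).foldl (fun d j =>
        d.modify (PySem.Chars.upperChar ((Motifs.getD i "").toList.getD j ' ')) []
          (fun l => l.set j (l.getD j 0 + 1))) d) d
    = Motifs.foldl (fun d row => (List.range k).foldl (fun d j =>
        d.modify (pvSym row j) [] (fun l => l.set j (l.getD j 0 + 1))) d) d :=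
  pv_foldl_range_getD Motifs "" (fun d row => (List.range k).foldl (fun d j =>
    d.modify (pvSym row j) [] (fun l => l.set j (l.getD j 0 + 1))) d) d

-- ===== B side =====

theorem pvRunEnd_le (col : List Char) (c : Char) (r : Nat) (hr : r ≤ col.length) :
    pvRunEnd col c r ≤ col.length := by
  rw [pvRunEnd]
  split_ifs with h
  · exact pvRunEnd_le col c (r + 1) h.1
  · exact hr
termination_by col.length - r
decreasing_by have := h.1; omega

theorem pvRunEnd_stop (col : List Char) (c : Char) (r : Nat) :
    ¬ (pvRunEnd col c r < col.length ∧ col.getD (pvRunEnd col c r) ' ' = c) := by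
  by_cases h : r < col.length ∧ col.getD r ' ' = c
  · rw [show pvRunEnd col c r = pvRunEnd col c (r + 1) by rw [pvRunEnd]; exact dif_pos h]
    exact pvRunEnd_stop col c (r + 1)
  · rw [show pvRunEnd col c r = r by rw [pvRunEnd]; exact dif_neg h]
    exact h
termination_by col.length - r
decreasing_by have := h.1; omega

theorem pvRunEnd_mem (col : List Char) (c : Char) (r m : Nat) (h1 : r ≤ m)
    (h2 : m < pvRunEnd col c r) : col.getD m ' ' = c := by
  by_cases h : r < col.length ∧ col.getD r ' ' = c
  · have he : pvRunEnd col c r = pvRunEnd col c (r + 1) := by rw [pvRunEnd]; exact dif_pos h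
    rcases Nat.eq_or_lt_of_le h1 with rfl | hlt
    · exact h.2
    · exact pvRunEnd_mem col c (r + 1) m hlt (he ▸ h2)
  · have he : pvRunEnd col c r = r := by rw [pvRunEnd]; exact dif_neg h
    rw [he] at h2; omega
termination_by col.length - r
decreasing_by have := h.1; omega

-- the suffix from i splits as the run of c followed by the suffix from the run end
theorem pv_drop_run (col : List Char) (c : Char) (i r : Nat) (hir : i ≤ r)
    (hrl : r ≤ col.length) (hrun : ∀ m, i ≤ m → m < r → col.getD m ' ' = c) :
    col.drop i = List.replicate (r - i) c ++ col.drop r := by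
  apply List.ext_getElem
  · simp only [List.length_drop, List.length_append, List.length_replicate]; omega
  · intro p h1 h2
    rw [List.getElem_drop]
    by_cases hp : p < r - i
    · rw [List.getElem_append_left (by simpa using hp), List.getElem_replicate]
      have hm := hrun (i + p) (Nat.le_add_right i p) (by omega)
      rwa [List.getD_eq_getElem _ _ (by omega)] at hm
    · rw [List.getElem_append_right (by simpa using hp), List.getElem_drop]
      congr 1
      simp only [List.length_replicate]
      omega

-- the run-length scan over a sorted column writes each present symbol's count at slot j
theorem pvColLoop_getD (j : Nat) (col : List Char) (hsorted : col.Pairwise (· ≤ ·))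
    (i : Nat) (d : PySem.Dict Char (List Int)) (s : Char) :
    (pvColLoop col j d i).getD s [] =
      if s ∈ col.drop i then (d.getD s []).set j (((col.drop i).count s : Nat) : Int)
      else d.getD s [] := by
  by_cases h : i < col.length
  · rw [pvColLoop, dif_pos h]
    have hir : i < pvRunEnd col (col.getD i ' ') i := by
      have h1 : pvRunEnd col (col.getD i ' ') i = pvRunEnd col (col.getD i ' ') (i + 1) := by
        rw [pvRunEnd]; exact dif_pos ⟨h, rfl⟩
      have h2 := pvRunEnd_ge col (col.getD i ' ') (i + 1)
      omega
    set c := col.getD i ' ' with hcdef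
    set r := pvRunEnd col c i with hrdef
    have hrl : r ≤ col.length := pvRunEnd_le col c i (Nat.le_of_lt h)
    have hrun : ∀ m, i ≤ m → m < r → col.getD m ' ' = c :=
      fun m hm1 hm2 => pvRunEnd_mem col c i m hm1 hm2
    have hD1 : col.drop i = List.replicate (r - i) c ++ col.drop r :=
      pv_drop_run col c i r (Nat.le_of_lt hir) hrl hrun
    have hpair := List.pairwise_iff_getElem.mp hsorted
    have hcnotin : c ∉ col.drop r := by
      intro hmem
      obtain ⟨p, hp, hpe⟩ := List.mem_iff_getElem.mp hmem
      rw [List.getElem_drop] at hpe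
      rw [List.length_drop] at hp
      have hrlen : r < col.length := by omega
      have hplen : r + p < col.length := by omega
      have hstop := pvRunEnd_stop col c i
      rw [← hrdef] at hstop
      have hne : col[r]'hrlen ≠ c := by
        intro hh
        exact hstop ⟨hrlen, by rw [List.getD_eq_getElem _ _ hrlen]; exact hh⟩
      have hic : col[i]'h = c := by
        rw [hcdef, List.getD_eq_getElem _ _ h]
      have hle1 : col[i]'h ≤ col[r]'hrlen := hpair i r h hrlen hir
      have hle2 : col[r]'hrlen ≤ col[r + p]'hplen := by
        rcases Nat.eq_zero_or_pos p with rfl | hppos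
        · exact le_refl _
        · exact hpair r (r + p) hrlen hplen (by omega)
      exact hne (le_antisymm (le_of_le_of_eq hle2 hpe) (hic ▸ hle1))
    have hcount_c : (col.drop i).count c = r - i := by
      rw [hD1, List.count_append, List.count_replicate, List.count_eq_zero.mpr hcnotin]
      simp
    have hmem_c : c ∈ col.drop i := by
      rw [hD1]
      exact List.mem_append_left _ (List.mem_replicate.mpr ⟨by omega, rfl⟩)
    rw [pvColLoop_getD j col hsorted r
      (d.modify c [] (fun l => l.set j ((r - i : Nat) : Int))) s]
    by_cases hsc : s = c
    · subst hsc
      rw [if_neg hcnotin, if_pos hmem_c, PySem.Dict.getD_modify, if_pos rfl, hcount_c]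
    · rw [PySem.Dict.getD_modify, if_neg hsc]
      have hmemiff : s ∈ col.drop i ↔ s ∈ col.drop r := by
        rw [hD1]
        simp [List.mem_append, List.mem_replicate, hsc]
      have hcnt : (col.drop i).count s = (col.drop r).count s := by
        rw [hD1, List.count_append, List.count_replicate]
        simp [beq_iff_eq, Ne.symm hsc]
      simp only [hmemiff, hcnt]
  · rw [pvColLoop, dif_neg h]
    have hdrop : col.drop i = [] := List.drop_eq_nil_of_le (Nat.le_of_not_lt h)
    simp [hdrop]
termination_by col.length - i
decreasing_by omega

theorem pvColLoop_keys (j : Nat) (col : List Char) (i : Nat) (d : PySem.Dict Char (List Int))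
    (hcol : ∀ c ∈ col, c ∈ d.keys) : (pvColLoop col j d i).keys = d.keys := by
  by_cases h : i < col.length
  · rw [pvColLoop, dif_pos h]
    have hir : i < pvRunEnd col (col.getD i ' ') i := by
      have h1 : pvRunEnd col (col.getD i ' ') i = pvRunEnd col (col.getD i ' ') (i + 1) := by
        rw [pvRunEnd]; exact dif_pos ⟨h, rfl⟩
      have h2 := pvRunEnd_ge col (col.getD i ' ') (i + 1)
      omega
    have hc : col.getD i ' ' ∈ col := by
      rw [List.getD_eq_getElem _ _ h]; exact List.getElem_mem h
    have hmod : (d.modify (col.getD i ' ') []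
        (fun l => l.set j ((pvRunEnd col (col.getD i ' ') i - i : Nat) : Int))).keys = d.keys := by
      rw [PySem.Dict.keys_modify, PySem.Dict.keys_insert_of_contains]
      rw [PySem.Dict.contains_eq_decide_mem_keys]
      exact decide_eq_true (hcol _ hc)
    rw [pvColLoop_keys j col (pvRunEnd col (col.getD i ' ') i) _
      (fun c hc' => by rw [hmod]; exact hcol c hc'), hmod]
  · rw [pvColLoop, dif_neg h]
termination_by col.length - i
decreasing_by omega

-- the initial {s: [0]*k for s in "ACGT"} dict
theorem pv_B_init_items (k : Nat) :
    (pvACGT.foldl (fun d s => d.insert s (List.replicate k (0 : Int)))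
      PySem.Dict.empty).items
    = pvACGT.map (fun s => (s, List.replicate k (0 : Int))) := by
  rw [PySem.Dict.items_foldl_insert_fresh pvACGT (fun s => s) (fun _ => List.replicate k (0 : Int))
      PySem.Dict.empty (fun a _ => PySem.Dict.contains_empty a) (by decide)]
  have hemp : (PySem.Dict.empty : PySem.Dict Char (List Int)).items = [] := rfl
  simp [hemp]

theorem pv_B_init_keys (k : Nat) :
    (pvACGT.foldl (fun d s => d.insert s (List.replicate k (0 : Int)))
      PySem.Dict.empty).keys = pvACGT := by
  have h : ∀ d : PySem.Dict Char (List Int), d.keys = d.items.map Prod.fst := fun _ => rfl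
  rw [h, pv_B_init_items, List.map_map]
  rfl

theorem pv_B_init_getD (k : Nat) (s : Char) (hs : s ∈ pvACGT) :
    (pvACGT.foldl (fun d s => d.insert s (List.replicate k (0 : Int)))
      PySem.Dict.empty).getD s [] = List.replicate k (0 : Int) := by
  apply PySem.Dict.getD_of_mem_items
  · rw [pv_B_init_items]
    exact List.mem_map.mpr ⟨s, hs, rfl⟩
  · rw [pv_B_init_keys]; decide

-- count of s in the sorted column j equals A's per-row count
theorem pv_B_col_count (Motifs : List String) (j : Nat) (s : Char) :
    ((PySem.List.sorted (Motifs.map (fun row => pvSym row j)) (fun c => c) false).count s : Int)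
    = (Motifs.countP (fun r => decide (pvSym r j = s)) : Int) := by
  norm_cast
  rw [(PySem.List.sorted_perm _ _ _).count_eq]
  rw [List.count_eq_countP, List.countP_map]
  apply List.countP_congr
  intro r _
  simp

theorem pv_B_col_mem (Motifs : List String) (j : Nat) (s : Char) :
    s ∈ PySem.List.sorted (Motifs.map (fun row => pvSym row j)) (fun c => c) false
    ↔ ∃ r ∈ Motifs, pvSym r j = s := by
  rw [PySem.List.mem_sorted, List.mem_map]

-- the column fold, seen through getD: after m columns, slots below m hold the counts
theorem pv_B_cols (Motifs : List String) (k : Nat) :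
    ∀ m, m ≤ k → ∀ s ∈ pvACGT,
    ((List.range m).foldl (fun d j =>
        pvColLoop (PySem.List.sorted (Motifs.map (fun row => pvSym row j)) (fun c => c) false)
          j d 0)
      (pvACGT.foldl (fun d s => d.insert s (List.replicate k (0 : Int)))
        PySem.Dict.empty)).getD s []
    = (List.range k).map (fun j => if j < m
        then (Motifs.countP (fun r => decide (pvSym r j = s)) : Int) else 0) := by
  intro m
  induction m with
  | zero =>
    intro _ s hs
    rw [List.range_zero, List.foldl_nil, pv_B_init_getD k s hs]
    apply List.ext_getElem
    · simp
    · intro p h1 h2; simp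
  | succ m ih =>
    intro hm s hs
    rw [List.range_succ, List.foldl_append, List.foldl_cons, List.foldl_nil]
    have hmk : m < k := hm
    have hsorted : (PySem.List.sorted (Motifs.map (fun row => pvSym row m))
        (fun c => c) false).Pairwise (· ≤ ·) :=
      PySem.List.sorted_pairwise _ _
    rw [pvColLoop_getD m _ hsorted 0 _ s]
    simp only [List.drop_zero]
    rw [ih (Nat.le_of_lt hmk) s hs]
    by_cases hmem : s ∈ PySem.List.sorted (Motifs.map (fun row => pvSym row m)) (fun c => c) false
    · rw [if_pos hmem, pv_map_range_set k m hmk]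
      apply List.map_congr_left
      intro p hp
      by_cases hpm : p = m
      · subst hpm
        simp only [if_pos (Nat.lt_succ_self p)]
        exact pv_B_col_count Motifs p s
      · rw [if_neg hpm]
        have hiff : (p < m + 1) ↔ (p < m) := by omega
        rw [if_congr hiff rfl rfl]
    · rw [if_neg hmem]
      have hzero : Motifs.countP (fun r => decide (pvSym r m = s)) = 0 := by
        rw [List.countP_eq_zero]
        intro r hr
        simp only [decide_eq_true_eq]
        intro hcontra
        exact hmem ((pv_B_col_mem Motifs m s).mpr ⟨r, hr, hcontra⟩)
      apply List.map_congr_left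
      intro p hp
      by_cases hpm : p = m
      · subst hpm
        rw [if_neg (by omega), if_pos (Nat.lt_succ_self p), hzero]
        simp
      · have hiff : (p < m + 1) ↔ (p < m) := by omega
        rw [if_congr hiff rfl rfl]

theorem pv_B_fold_keys (Motifs : List String) (k : Nat)
    (hsym : ∀ row ∈ Motifs, ∀ j < k, pvSym row j ∈ pvACGT) :
    ∀ m, m ≤ k →
    ((List.range m).foldl (fun d j =>
        pvColLoop (PySem.List.sorted (Motifs.map (fun row => pvSym row j)) (fun c => c) false)
          j d 0)
      (pvACGT.foldl (fun d s => d.insert s (List.replicate k (0 : Int)))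
        PySem.Dict.empty)).keys = pvACGT := by
  intro m
  induction m with
  | zero => intro _; rw [List.range_zero, List.foldl_nil]; exact pv_B_init_keys k
  | succ m ih =>
    intro hm
    rw [List.range_succ, List.foldl_append, List.foldl_cons, List.foldl_nil]
    rw [pvColLoop_keys, ih (Nat.le_of_succ_le hm)]
    intro c hc
    rw [ih (Nat.le_of_succ_le hm)]
    rw [PySem.List.mem_sorted, List.mem_map] at hc
    obtain ⟨r, hr, rfl⟩ := hc
    exact hsym r hr m hm

-- ===== VERDICT (by name: the statement is the Claim_ definition above) =====
set_option maxHeartbeats 1000000 in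
theorem Count_spec : Claim_equal_Count := by
  unfold Claim_equal_Count Spec_Count
  intro Motifs _ hPre
  obtain ⟨hne, hP⟩ := hPre
  simp only [Count, Count_alt]
  rw [pv_ACGT_toList]
  set k := (Motifs.headD "").toList.length with hk
  have hsym : ∀ row ∈ Motifs, ∀ j < k, pvSym row j ∈ pvACGT := by
    intro row hr j hj
    obtain ⟨hlen, hch⟩ := hP row hr
    have hjlen : j < row.toList.length := lt_of_lt_of_le hj hlen
    have hlt : j < (row.toList.take k).length := by
      simp only [List.length_take]; omega
    have hmem : row.toList[j]'hjlen ∈ row.toList.take k := by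
      rw [← List.getElem_take (h := hlt)]
      exact List.getElem_mem hlt
    have hgd : row.toList.getD j ' ' = row.toList[j]'hjlen :=
      List.getD_eq_getElem _ _ hjlen
    unfold pvSym
    rw [hgd]
    exact of_decide_eq_true (List.all_eq_true.mp hch _ hmem)
  -- the A-side index loop is the structural fold over Motifs
  rw [pv_A_index_loop Motifs k]
  -- characterise the A-side dict
  have hkeysA := pv_A_rows_keys k Motifs hsym _ (pv_A_init_keys k)
  have hgetdA := pv_A_rows k Motifs hsym _ (fun _ _ => (0 : Int))
    (fun s hs => pv_A_init_getD k s hs)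
  have hnodupA : (Motifs.foldl (fun d row => (List.range k).foldl (fun d j =>
      d.modify (pvSym row j) [] (fun l => l.set j (l.getD j 0 + 1))) d)
      (pvACGT.foldl (fun d symbol =>
        (List.range k).foldl (fun d _ => d.modify symbol [] (fun l => l ++ [(0 : Int)]))
          (d.insert symbol [])) PySem.Dict.empty)).keys.Nodup := by
    rw [hkeysA]; decide
  rw [PySem.Dict.items_eq_map_keys _ hnodupA [], hkeysA]
  -- characterise the B-side dict
  have hkeysB := pv_B_fold_keys Motifs k hsym k (Nat.le_refl k)
  have hnodupB : ((List.range k).foldl (fun d j =>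
      pvColLoop (PySem.List.sorted (Motifs.map (fun row => pvSym row j)) (fun c => c) false)
        j d 0)
      (pvACGT.foldl (fun d s => d.insert s (List.replicate k (0 : Int)))
        PySem.Dict.empty)).keys.Nodup := by
    rw [hkeysB]; decide
  rw [PySem.Dict.items_eq_map_keys _ hnodupB [], hkeysB]
  rw [List.map_map, List.map_map]
  apply List.map_congr_left
  intro s hs
  simp only [Function.comp]
  congr 1
  rw [hgetdA s hs, pv_B_cols Motifs k k (Nat.le_refl k) s hs]
  apply List.map_congr_left
  intro j hj
  rw [if_pos (List.mem_range.mp hj)]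
  simp
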